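-- pv_equiv track=rewrite | github.com/Aceroph/ace-of-spades | utils/misc.py | time_format
-- ===== SOURCE A (Python) =====
-- def time_format(time: int) -> str:
--     minutes, seconds = divmod(int(time), 60)
--     hours, minutes = divmod(minutes, 60)
--     days, hours = divmod(hours, 24)
--     weeks, days = divmod(days, 7)
--     clean = f" {weeks}w {days}d {hours}h {minutes}m {seconds}s"
--     for _ in range(clean.count(" 0")):
--         index = clean.index(" 0")
--         clean = clean[: index + 1] + clean[index + 4 :]
--     return clean.strip() or "0s"
-- ===== SOURCE B (Python) =====
-- def time_format(time: int) -> str: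
--     minutes, seconds = divmod(int(time), 60)
--     hours, minutes = divmod(minutes, 60)
--     days, hours = divmod(hours, 24)
--     weeks, days = divmod(days, 7)
--     pairs = [(weeks, "w"), (days, "d"), (hours, "h"), (minutes, "m"), (seconds, "s")]
--     parts = [f"{v}{s}" for v, s in pairs if v != 0]
--     return " ".join(parts) or "0s"
-- ===== Notes on version B (the rewrite author's own statement) =====
-- stated objective: simpler
-- what changed: B keeps the divmod cascade but replaces A's build-full-string-then-repeated-index/splice zero removal with a direct filter of the (value, suffix) field list joined by spaces.
import Mathlib
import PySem

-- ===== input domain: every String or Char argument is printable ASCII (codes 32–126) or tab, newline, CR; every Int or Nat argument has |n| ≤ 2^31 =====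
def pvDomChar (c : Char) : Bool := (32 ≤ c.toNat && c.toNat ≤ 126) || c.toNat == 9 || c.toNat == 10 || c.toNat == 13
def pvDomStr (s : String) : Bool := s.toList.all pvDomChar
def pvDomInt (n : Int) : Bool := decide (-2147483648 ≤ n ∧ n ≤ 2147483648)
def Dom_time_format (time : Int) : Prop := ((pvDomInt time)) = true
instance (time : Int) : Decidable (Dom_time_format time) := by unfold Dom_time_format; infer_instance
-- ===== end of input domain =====

-- B replaces A's build-string-then-splice-out-" 0…"-fields surgery by filtering the
-- (value, suffix) field list and joining with spaces; objective: simpler. Same return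
-- value everywhere (both are total on Int).

-- ===== PORT A =====
-- one iteration of A's for-loop body: index = clean.index(" 0"); clean = clean[:index+1] + clean[index+4:]
-- (inside the loop the substring " 0" is always present, so str.index = PySem.Chars.find there)
def tfStep (clean : List Char) : List Char :=
  let index := PySem.Chars.find clean [' ', '0']
  PySem.List.slice clean none (some (index + 1)) ++ PySem.List.slice clean (some (index + 4)) none

def time_format (time : Int) : String :=
  let minutes0 := PySem.Int.floordiv time 60
  let seconds := PySem.Int.mod time 60
  let hours0 := PySem.Int.floordiv minutes0 60
  let minutes := PySem.Int.mod minutes0 60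
  let days0 := PySem.Int.floordiv hours0 24
  let hours := PySem.Int.mod hours0 24
  let weeks := PySem.Int.floordiv days0 7
  let days := PySem.Int.mod days0 7
  -- clean = f" {weeks}w {days}d {hours}h {minutes}m {seconds}s"
  let clean : List Char :=
    [' '] ++ PySem.Int.toChars weeks ++ ['w', ' '] ++ PySem.Int.toChars days ++ ['d', ' ']
      ++ PySem.Int.toChars hours ++ ['h', ' '] ++ PySem.Int.toChars minutes ++ ['m', ' ']
      ++ PySem.Int.toChars seconds ++ ['s']
  -- for _ in range(clean.count(" 0")): …
  let final := (PySem.List.pyRange 0 ((PySem.Chars.count clean [' ', '0'] : Nat) : Int) 1).foldl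
      (fun c _ => tfStep c) clean
  let stripped := PySem.Chars.strip final
  if stripped.isEmpty then "0s" else String.ofList stripped

-- ===== PORT B =====
def time_format_alt (time : Int) : String :=
  let minutes0 := PySem.Int.floordiv time 60
  let seconds := PySem.Int.mod time 60
  let hours0 := PySem.Int.floordiv minutes0 60
  let minutes := PySem.Int.mod minutes0 60
  let days0 := PySem.Int.floordiv hours0 24
  let hours := PySem.Int.mod hours0 24
  let weeks := PySem.Int.floordiv days0 7
  let days := PySem.Int.mod days0 7
  let pairs : List (Int × Char) :=
    [(weeks, 'w'), (days, 'd'), (hours, 'h'), (minutes, 'm'), (seconds, 's')]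
  let parts := (pairs.filter (fun p => p.1 != 0)).map (fun p => PySem.Int.toChars p.1 ++ [p.2])
  let joined := PySem.Chars.join [' '] parts
  if joined.isEmpty then "0s" else String.ofList joined

-- ===== PRECONDITION & SPEC =====
def Spec_time_format (time : Int) (out : String) : Prop := out = time_format_alt time
instance (time : Int) (out : String) : Decidable (Spec_time_format time out) := by unfold Spec_time_format; infer_instance

-- ===== CLAIM (what is proved, stated in full; the proofs are below) =====
def Claim_equal_time_format : Prop := ∀ (time : Int), Dom_time_format time → Spec_time_format time (time_format time)

-- ===== LEMMAS AND PROOFS =====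

-- model: the loop state is " " + field1 + " " + field2 + …, the flatten of (' ' :: field)
def tfSeq (fs : List (List Char)) : List Char := (fs.map (fun f => ' ' :: f)).flatten

-- a well-formed field: nonempty, no whitespace, and 2 chars long if it starts with '0'
def tfGood (f : List Char) : Prop :=
  f ≠ [] ∧ (∀ c ∈ f, PySem.Chars.isspace c = false) ∧ (f.head? = some '0' → f.length = 2)

def tfZero (f : List Char) : Bool := f.head? == some '0'

-- structural mirrors of PySem.Chars.count / find for the fixed pattern " 0"
def tfCnt : List Char → Nat
  | [] => 0
  | c :: t => if [' ', '0'].isPrefixOf (c :: t) then tfCnt t.tail + 1 else tfCnt t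
  termination_by s => s.length
  decreasing_by
    all_goals simp [List.length_tail]

def tfFind : List Char → Int
  | [] => -1
  | c :: t =>
    if [' ', '0'].isPrefixOf (c :: t) then 0
    else if tfFind t = -1 then -1 else tfFind t + 1

theorem tfFind_ge : ∀ s : List Char, -1 ≤ tfFind s := by
  intro s
  induction s with
  | nil => simp [tfFind]
  | cons c t ih =>
    simp only [tfFind]
    split_ifs <;> omega

theorem countgo_eq : ∀ (fuel : Nat) (s : List Char) (acc : Nat), s.length ≤ fuel →
    PySem.Chars.count.go [' ', '0'] fuel s acc = acc + tfCnt s := by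
  intro fuel
  induction fuel with
  | zero =>
    intro s acc h
    have : s = [] := by cases s <;> simp_all
    subst this
    rw [PySem.Chars.count.go.eq_def]
    simp [tfCnt]
  | succ fuel ih =>
    intro s acc h
    cases s with
    | nil => rw [PySem.Chars.count.go.eq_def]; simp [tfCnt]
    | cons c t =>
      rw [PySem.Chars.count.go.eq_def]
      simp only []
      by_cases hp : [' ', '0'].isPrefixOf (c :: t) = true
      · rw [if_pos hp]
        rw [ih _ _ (by simp at h ⊢; omega)]
        rw [tfCnt]
        rw [if_pos hp]
        simp
        omega
      · rw [if_neg hp]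
        rw [ih _ _ (by simp at h; omega)]
        rw [tfCnt, if_neg hp]

theorem count_eq_tfCnt (s : List Char) : PySem.Chars.count s [' ', '0'] = tfCnt s := by
  rw [PySem.Chars.count]
  rw [if_neg (by simp)]
  rw [countgo_eq s.length s 0 le_rfl]
  omega

theorem findgo_eq : ∀ (s : List Char) (k : Nat),
    PySem.Chars.find.go [' ', '0'] s k = if tfFind s = -1 then -1 else tfFind s + k := by
  intro s
  induction s with
  | nil => intro k; rw [PySem.Chars.find.go.eq_def]; simp [tfFind]
  | cons c t ih =>
    intro k
    rw [PySem.Chars.find.go.eq_def]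
    simp only []
    by_cases hp : [' ', '0'].isPrefixOf (c :: t) = true
    · rw [if_pos hp, tfFind, if_pos hp]
      simp
    · rw [if_neg hp, ih (k + 1), tfFind, if_neg hp]
      have := tfFind_ge t
      by_cases h1 : tfFind t = -1
      · simp [h1]
      · rw [if_neg h1, if_neg (by omega), if_neg (by omega)]
        push_cast
        ring

theorem find_eq_tfFind (s : List Char) : PySem.Chars.find s [' ', '0'] = tfFind s := by
  rw [PySem.Chars.find, findgo_eq s 0]
  have := tfFind_ge s
  by_cases h1 : tfFind s = -1 <;> simp [h1]

-- walking a space-free segment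
theorem notPrefix_of_ne_space (c : Char) (t : List Char) (hc : c ≠ ' ') :
    ¬([' ', '0'].isPrefixOf (c :: t) = true) := by
  simp [List.isPrefixOf]
  intro h
  exact absurd h.symm hc

theorem tfCnt_seg (f rest : List Char) (h : ∀ c ∈ f, c ≠ ' ') :
    tfCnt (f ++ rest) = tfCnt rest := by
  induction f with
  | nil => simp
  | cons c f' ih =>
    have hc : c ≠ ' ' := h c (by simp)
    rw [List.cons_append, tfCnt, if_neg (notPrefix_of_ne_space c _ hc)]
    exact ih (fun x hx => h x (by simp [hx]))

theorem tfFind_seg (f rest : List Char) (h : ∀ c ∈ f, c ≠ ' ') :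
    tfFind (f ++ rest) = if tfFind rest = -1 then -1 else tfFind rest + f.length := by
  induction f with
  | nil => simp
  | cons c f' ih =>
    have hc : c ≠ ' ' := h c (by simp)
    rw [List.cons_append, tfFind, if_neg (notPrefix_of_ne_space c _ hc)]
    rw [ih (fun x hx => h x (by simp [hx]))]
    have := tfFind_ge rest
    by_cases h1 : tfFind rest = -1
    · simp [h1]
    · rw [if_neg h1, if_neg (by omega), if_neg (by omega)]
      simp only [List.length_cons]
      push_cast
      omega

theorem tfSeq_append (a b : List (List Char)) : tfSeq (a ++ b) = tfSeq a ++ tfSeq b := by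
  simp [tfSeq]

theorem ne_space_of_not_isspace (c : Char) (h : PySem.Chars.isspace c = false) : c ≠ ' ' := by
  intro h'
  subst h'
  simp [PySem.Chars.isspace] at h

theorem zero_shape (f : List Char) (hg : tfGood f) (hz : tfZero f = true) :
    ∃ c1, f = ['0', c1] := by
  obtain ⟨hne, hsp, hlen⟩ := hg
  simp only [tfZero, beq_iff_eq] at hz
  cases f with
  | nil => simp at hz
  | cons c t =>
    simp at hz
    subst hz
    have := hlen (by simp)
    cases t with
    | nil => simp at this
    | cons c1 t' =>
      cases t' with
      | nil => exact ⟨c1, rfl⟩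
      | cons _ _ => simp at this

theorem nonzero_head (f : List Char) (hne : f ≠ []) (hz : tfZero f = false) :
    ∃ c t, f = c :: t ∧ c ≠ '0' := by
  cases f with
  | nil => exact absurd rfl hne
  | cons c t =>
    refine ⟨c, t, rfl, ?_⟩
    simp [tfZero] at hz
    exact hz

theorem notPrefix_snd (c : Char) (t : List Char) (hc : c ≠ '0') :
    ¬([' ', '0'].isPrefixOf (' ' :: c :: t) = true) := by
  simp [List.isPrefixOf]
  intro h
  exact absurd h.symm hc

theorem tfCnt_seq (fs : List (List Char)) (h : ∀ f ∈ fs, tfGood f) :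
    tfCnt (tfSeq fs) = fs.countP tfZero := by
  induction fs with
  | nil => simp [tfSeq, tfCnt]
  | cons f fs' ih =>
    have hgf := h f (by simp)
    obtain ⟨hne, hsp, hlen⟩ := hgf
    have hsq : tfSeq (f :: fs') = ' ' :: (f ++ tfSeq fs') := by simp [tfSeq]
    have ihv := ih (fun g hg => h g (by simp [hg]))
    by_cases hz : tfZero f = true
    · obtain ⟨c1, hf⟩ := zero_shape f ⟨hne, hsp, hlen⟩ hz
      subst hf
      rw [hsq]
      rw [tfCnt, if_pos (by simp [List.isPrefixOf])]
      simp only [List.cons_append, List.nil_append, List.tail_cons]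
      have hc1 : c1 ≠ ' ' := ne_space_of_not_isspace c1 (hsp c1 (by simp))
      have := tfCnt_seg [c1] (tfSeq fs') (by simpa using hc1)
      simp only [List.cons_append, List.nil_append] at this
      rw [this, ihv, List.countP_cons, if_pos hz]
    · rw [Bool.not_eq_true] at hz
      obtain ⟨c, t, hf, hc0⟩ := nonzero_head f hne hz
      subst hf
      rw [hsq]
      simp only [List.cons_append]
      rw [tfCnt, if_neg (notPrefix_snd c _ hc0)]
      have := tfCnt_seg (c :: t) (tfSeq fs')
        (fun x hx => ne_space_of_not_isspace x (hsp x hx))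
      simp only [List.cons_append] at this
      rw [this, ihv, List.countP_cons]
      simp [hz]

theorem tfFind_seq (pre : List (List Char)) (f0 : List Char) (suf : List (List Char))
    (hg : ∀ f ∈ pre ++ f0 :: suf, tfGood f)
    (hpre : ∀ f ∈ pre, tfZero f = false) (hz : tfZero f0 = true) :
    tfFind (tfSeq (pre ++ f0 :: suf)) = ((tfSeq pre).length : Int) := by
  induction pre with
  | nil =>
    obtain ⟨c1, hf⟩ := zero_shape f0 (hg f0 (by simp)) hz
    subst hf
    simp only [List.nil_append]
    have hsq : tfSeq (['0', c1] :: suf) = ' ' :: ('0' :: c1 :: tfSeq suf) := by simp [tfSeq]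
    rw [hsq, tfFind, if_pos (by simp [List.isPrefixOf])]
    simp [tfSeq]
  | cons f pre' ih =>
    have hgf := hg f (by simp)
    obtain ⟨hne, hsp, hlen⟩ := hgf
    have hzf : tfZero f = false := hpre f (by simp)
    obtain ⟨c, t, hf, hc0⟩ := nonzero_head f hne hzf
    have ihv := ih (fun g hgm => hg g (by simp at hgm ⊢; tauto))
      (fun g hgm => hpre g (by simp [hgm]))
    have hge : (0 : Int) ≤ tfFind (tfSeq (pre' ++ f0 :: suf)) := by rw [ihv]; positivity
    have hsq : tfSeq ((f :: pre') ++ f0 :: suf) = ' ' :: (f ++ tfSeq (pre' ++ f0 :: suf)) := by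
      simp [tfSeq]
    rw [hsq, hf]
    simp only [List.cons_append]
    rw [tfFind, if_neg (notPrefix_snd c _ hc0)]
    have hseg := tfFind_seg (c :: t) (tfSeq (pre' ++ f0 :: suf))
      (fun x hx => ne_space_of_not_isspace x (hsp x (hf ▸ hx)))
    simp only [List.cons_append] at hseg
    rw [hseg, if_neg (by omega), if_neg (by omega), ihv]
    have hsq2 : tfSeq ((c :: t) :: pre') = ' ' :: ((c :: t) ++ tfSeq pre') := by simp [tfSeq]
    rw [hsq2]
    simp only [List.length_cons, List.length_append]
    push_cast
    omega

theorem tfStep_seq (pre : List (List Char)) (f0 : List Char) (suf : List (List Char))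
    (hg : ∀ f ∈ pre ++ f0 :: suf, tfGood f)
    (hpre : ∀ f ∈ pre, tfZero f = false) (hz : tfZero f0 = true) :
    tfStep (tfSeq (pre ++ f0 :: suf)) =
      tfSeq (pre ++ suf) ++ (if suf.isEmpty then [' '] else []) := by
  obtain ⟨c1, hf⟩ := zero_shape f0 (hg f0 (by simp)) hz
  subst hf
  have hfind := tfFind_seq pre _ suf hg hpre hz
  have hsq : tfSeq (pre ++ ['0', c1] :: suf) =
      tfSeq pre ++ (' ' :: '0' :: c1 :: tfSeq suf) := by
    rw [tfSeq_append]; simp [tfSeq]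
  set p := (tfSeq pre).length with hp
  show tfStep (tfSeq (pre ++ ['0', c1] :: suf)) = _
  rw [tfStep]
  simp only [find_eq_tfFind, hfind]
  rw [PySem.List.slice_to _ (by positivity), PySem.List.slice_from _ (by positivity)]
  have h1 : ((p : Int) + 1).toNat = p + 1 := by omega
  have h4 : ((p : Int) + 4).toNat = p + 4 := by omega
  rw [h1, h4, hsq]
  have htake : (tfSeq pre ++ (' ' :: '0' :: c1 :: tfSeq suf)).take (p + 1) =
      tfSeq pre ++ [' '] := by
    rw [hp, List.take_append]
    simp
  have hdrop : (tfSeq pre ++ (' ' :: '0' :: c1 :: tfSeq suf)).drop (p + 4) =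
      (tfSeq suf).drop 1 := by
    rw [hp, List.drop_append]
    simp
  rw [htake, hdrop]
  cases suf with
  | nil => simp [tfSeq]
  | cons g suf' =>
    have : tfSeq (g :: suf') = ' ' :: (g ++ tfSeq suf') := by simp [tfSeq]
    rw [this]
    simp [tfSeq_append, this]

theorem rstrip_append_space (y : List Char) :
    PySem.Chars.rstrip (y ++ [' ']) = PySem.Chars.rstrip y := by
  simp only [PySem.Chars.rstrip, List.reverse_append, List.reverse_singleton,
    List.singleton_append, List.dropWhile_cons_of_pos (by decide : PySem.Chars.isspace ' ' = true)]

theorem strip_append_space (x : List Char) :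
    PySem.Chars.strip (x ++ [' ']) = PySem.Chars.strip x := by
  simp only [PySem.Chars.strip, PySem.Chars.lstrip]
  rw [List.dropWhile_append]
  split_ifs with h
  · rw [List.isEmpty_iff] at h
    rw [h]
    decide
  · exact rstrip_append_space _

theorem tfLoop (z : Nat) : ∀ fs : List (List Char), (∀ f ∈ fs, tfGood f) →
    fs.countP tfZero = z →
    PySem.Chars.strip (tfStep^[z] (tfSeq fs)) =
      PySem.Chars.strip (tfSeq (fs.filter (fun f => !tfZero f))) := by
  induction z with
  | zero =>
    intro fs hg hc
    have hall : ∀ f ∈ fs, ¬(tfZero f = true) := List.countP_eq_zero.mp hc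
    rw [List.filter_eq_self.mpr (fun f hf => by simpa using hall f hf)]
    simp
  | succ z ih =>
    intro fs hg hc
    set pre := fs.takeWhile (fun f => !tfZero f) with hpredef
    set rest := fs.dropWhile (fun f => !tfZero f) with hrestdef
    have hfs : fs = pre ++ rest := (List.takeWhile_append_dropWhile).symm
    have hprez : ∀ f ∈ pre, tfZero f = false := by
      intro f hf
      have := List.mem_takeWhile_imp hf
      simpa using this
    have hpre0 : pre.countP tfZero = 0 :=
      List.countP_eq_zero.mpr (fun f hf => by simp [hprez f hf])
    obtain ⟨f0, suf, hrest2⟩ : ∃ f0 suf, rest = f0 :: suf := by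
      cases hr : rest with
      | nil =>
        exfalso
        rw [hfs, hr, List.append_nil] at hc
        omega
      | cons a b => exact ⟨a, b, rfl⟩
    have hz0 : tfZero f0 = true := by
      have := List.head?_dropWhile_not (fun f => !tfZero f) fs
      rw [← hrestdef, hrest2] at this
      simpa using this
    have hgall : ∀ f ∈ pre ++ f0 :: suf, tfGood f := by
      rw [← hrest2, ← hfs]
      exact hg
    have hcnt : pre.countP tfZero + (1 + suf.countP tfZero) = z + 1 := by
      rw [hfs, hrest2] at hc
      simp [List.countP_append, hz0] at hc
      omega
    conv_lhs => rw [hfs, hrest2]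
    rw [Function.iterate_succ_apply, tfStep_seq pre f0 suf hgall hprez hz0]
    have hfilter : fs.filter (fun f => !tfZero f) = pre ++ suf.filter (fun f => !tfZero f) := by
      rw [hfs, hrest2, List.filter_append, List.filter_cons_of_neg (by simp [hz0]),
        List.filter_eq_self.mpr (fun f hf => by simp [hprez f hf])]
    cases suf with
    | nil =>
      have hzz : z = 0 := by simp at hcnt; omega
      subst hzz
      simp only [List.isEmpty_nil, Function.iterate_zero, id_eq, if_true]
      rw [strip_append_space, hfilter]
      simp
    | cons g suf' =>
      rw [if_neg (by simp), List.append_nil]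
      have hgood2 : ∀ f ∈ pre ++ g :: suf', tfGood f := by
        intro f hf
        apply hgall
        simp at hf ⊢
        tauto
      rw [ih (pre ++ g :: suf') hgood2 (by
        rw [List.countP_append]
        simp [List.countP_cons] at hcnt ⊢
        omega)]
      rw [hfilter, List.filter_append]
      rw [List.filter_eq_self.mpr (fun f hf => by simp [hprez f hf])]

theorem tfSeq_last (fs : List (List Char)) (hne : fs ≠ []) (h : ∀ f ∈ fs, tfGood f) :
    ∃ l c, tfSeq fs = l ++ [c] ∧ PySem.Chars.isspace c = false := by
  induction fs with
  | nil => exact absurd rfl hne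
  | cons f fs' ih =>
    obtain ⟨hfne, hsp, -⟩ := h f (by simp)
    cases fs' with
    | nil =>
      refine ⟨' ' :: f.dropLast, f.getLast hfne, ?_, hsp _ (List.getLast_mem hfne)⟩
      simp [tfSeq, List.dropLast_append_getLast hfne]
    | cons g r =>
      obtain ⟨l, c, hlc, hc⟩ := ih (by simp) (fun x hx => h x (by simp at hx ⊢; tauto))
      refine ⟨' ' :: f ++ l, c, ?_, hc⟩
      have : tfSeq (f :: g :: r) = ' ' :: (f ++ tfSeq (g :: r)) := by simp [tfSeq]
      rw [this, hlc]
      simp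

theorem rstrip_noop (y l : List Char) (c : Char) (hy : y = l ++ [c])
    (h : PySem.Chars.isspace c = false) : PySem.Chars.rstrip y = y := by
  subst hy
  simp only [PySem.Chars.rstrip, List.reverse_append, List.reverse_singleton,
    List.singleton_append]
  rw [List.dropWhile_cons_of_neg (by simp [h])]
  simp

theorem join_seq (fs : List (List Char)) (f : List Char) :
    PySem.Chars.join [' '] (f :: fs) = f ++ tfSeq fs := by
  induction fs generalizing f with
  | nil => simp [PySem.Chars.join_singleton, tfSeq]
  | cons g r ih =>
    rw [PySem.Chars.join_cons_cons, ih g]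
    have : tfSeq (g :: r) = ' ' :: (g ++ tfSeq r) := by simp [tfSeq]
    rw [this]
    simp

theorem strip_seq (fs : List (List Char)) (h : ∀ f ∈ fs, tfGood f) :
    PySem.Chars.strip (tfSeq fs) = PySem.Chars.join [' '] fs := by
  cases fs with
  | nil => simp [tfSeq, PySem.Chars.join_nil, PySem.Chars.strip, PySem.Chars.lstrip,
      PySem.Chars.rstrip]
  | cons f fs' =>
    obtain ⟨hfne, hsp, -⟩ := h f (by simp)
    obtain ⟨c0, t, hf⟩ : ∃ c0 t, f = c0 :: t := by
      cases f with
      | nil => exact absurd rfl hfne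
      | cons a b => exact ⟨a, b, rfl⟩
    have hsq : tfSeq (f :: fs') = ' ' :: (f ++ tfSeq fs') := by simp [tfSeq]
    have hlst : PySem.Chars.lstrip (tfSeq (f :: fs')) = f ++ tfSeq fs' := by
      rw [hsq, PySem.Chars.lstrip, List.dropWhile_cons_of_pos (by decide), hf]
      rw [List.cons_append, List.dropWhile_cons_of_neg (by simp [hsp c0 (by simp [hf])])]
    rw [PySem.Chars.strip, hlst, join_seq]
    cases fs' with
    | nil =>
      have : f ++ tfSeq [] = f.dropLast ++ [f.getLast hfne] := by
        simp [tfSeq, List.dropLast_append_getLast hfne]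
      exact rstrip_noop _ _ _ this (hsp _ (List.getLast_mem hfne))
    | cons g r =>
      obtain ⟨l, c, hlc, hc⟩ := tfSeq_last (g :: r) (by simp)
        (fun x hx => h x (by simp at hx ⊢; tauto))
      exact rstrip_noop _ (f ++ l) c (by rw [hlc]; simp) hc

-- digits of Nat.toDigitsCore
theorem toDigitsCore_spec : ∀ (fuel n : Nat) (ds : List Char), n < 10 ^ fuel → 0 < fuel →
    ∃ l, Nat.toDigitsCore 10 fuel n ds = l ++ ds ∧ l ≠ [] ∧
      (∀ c ∈ l, 48 ≤ c.toNat ∧ c.toNat ≤ 57) ∧ ((l.head? = some '0') ↔ n = 0) := by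
  intro fuel
  induction fuel with
  | zero => intro n ds h h0; omega
  | succ fuel ih =>
    intro n ds h _
    rw [Nat.toDigitsCore]
    have hd : ∀ r : Nat, r < 10 →
        (48 ≤ (Nat.digitChar r).toNat ∧ (Nat.digitChar r).toNat ≤ 57) ∧
          ((Nat.digitChar r = '0') ↔ r = 0) := by
      intro r hr
      interval_cases r <;> simp [Nat.digitChar]
    have hmod : n % 10 < 10 := Nat.mod_lt _ (by omega)
    by_cases hq : n / 10 = 0
    · rw [if_pos hq]
      refine ⟨[Nat.digitChar (n % 10)], rfl, by simp, ?_, ?_⟩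
      · intro c hc
        simp at hc
        subst hc
        exact (hd _ hmod).1
      · simp only [List.head?_cons, Option.some_inj]
        rw [(hd _ hmod).2]
        omega
    · rw [if_neg hq]
      have hfuel : 0 < fuel := by
        by_contra h0
        have : fuel = 0 := by omega
        subst this
        have : n < 10 := by simpa using h
        omega
      have hlt : n / 10 < 10 ^ fuel := by
        rw [Nat.div_lt_iff_lt_mul (by omega)]
        calc n < 10 ^ (fuel + 1) := h
          _ = 10 ^ fuel * 10 := by ring
      obtain ⟨l, hl, hlne, hldig, hlhead⟩ := ih (n / 10) (Nat.digitChar (n % 10) :: ds) hlt hfuel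
      refine ⟨l ++ [Nat.digitChar (n % 10)], by rw [hl]; simp, by simp, ?_, ?_⟩
      · intro c hc
        simp at hc
        rcases hc with hc | hc
        · exact hldig c hc
        · subst hc
          exact (hd _ hmod).1
      · rw [List.head?_append_of_ne_nil _ hlne]
        rw [hlhead]
        omega

theorem isspace_digit (c : Char) (h1 : 48 ≤ c.toNat) (h2 : c.toNat ≤ 57) :
    PySem.Chars.isspace c = false := by
  simp [PySem.Chars.isspace]
  omega

theorem toChars_zero : PySem.Int.toChars 0 = ['0'] := by decide

theorem toChars_spec (v : Int) :
    PySem.Int.toChars v ≠ [] ∧ (∀ c ∈ PySem.Int.toChars v, PySem.Chars.isspace c = false) ∧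
      (((PySem.Int.toChars v).head? = some '0') ↔ v = 0) := by
  have hdig : ∀ x : Nat, ∃ l, Nat.toDigits 10 x = l ∧ l ≠ [] ∧
      (∀ c ∈ l, 48 ≤ c.toNat ∧ c.toNat ≤ 57) ∧ ((l.head? = some '0') ↔ x = 0) := by
    intro x
    have hx : x < 10 ^ (x + 1) := by
      calc x < 10 ^ x := Nat.lt_pow_self (by omega)
        _ ≤ 10 ^ (x + 1) := Nat.pow_le_pow_right (by omega) (by omega)
    obtain ⟨l, hl, h1, h2, h3⟩ := toDigitsCore_spec (x + 1) x [] hx (by omega)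
    exact ⟨l, by rw [Nat.toDigits, hl]; simp, h1, h2, h3⟩
  by_cases hv : v < 0
  · obtain ⟨l, hl, h1, h2, h3⟩ := hdig v.natAbs
    rw [PySem.Int.toChars, if_pos hv, hl]
    refine ⟨by simp, ?_, ?_⟩
    · intro c hc
      simp at hc
      rcases hc with hc | hc
      · subst hc; decide
      · exact isspace_digit c (h2 c hc).1 (h2 c hc).2
    · simp only [List.head?_cons, Option.some_inj]
      constructor
      · intro h; exact absurd h (by decide)
      · intro h; omega
  · obtain ⟨l, hl, h1, h2, h3⟩ := hdig v.toNat
    rw [PySem.Int.toChars, if_neg hv, hl]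
    refine ⟨h1, fun c hc => isspace_digit c (h2 c hc).1 (h2 c hc).2, ?_⟩
    rw [h3]
    omega

theorem field_good (v : Int) (c : Char) (hc : PySem.Chars.isspace c = false) :
    tfGood (PySem.Int.toChars v ++ [c]) := by
  obtain ⟨hne, hsp, hhead⟩ := toChars_spec v
  refine ⟨by simp, ?_, ?_⟩
  · intro x hx
    simp at hx
    rcases hx with hx | hx
    · exact hsp x hx
    · subst hx; exact hc
  · intro h
    rw [List.head?_append_of_ne_nil _ hne] at h
    have hv := hhead.mp h
    subst hv
    rw [toChars_zero]
    rfl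

theorem field_zero (v : Int) (c : Char) :
    tfZero (PySem.Int.toChars v ++ [c]) = decide (v = 0) := by
  obtain ⟨hne, -, hhead⟩ := toChars_spec v
  rw [tfZero, List.head?_append_of_ne_nil _ hne]
  by_cases hv : v = 0
  · subst hv
    rw [toChars_zero]
    rfl
  · simp [hv]
    intro h
    exact absurd (hhead.mp h) hv

theorem filter_map_field (ps : List (Int × Char)) :
    ((ps.map (fun p => PySem.Int.toChars p.1 ++ [p.2])).filter (fun f => !tfZero f)) =
      ((ps.filter (fun p => p.1 != 0)).map (fun p => PySem.Int.toChars p.1 ++ [p.2])) := by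
  induction ps with
  | nil => simp
  | cons p ps' ih =>
    by_cases h : p.1 = 0 <;>
      simp [List.map_cons, field_zero, h, ih]

theorem foldl_const_iterate {α β : Type} (g : α → α) :
    ∀ (l : List β) (x : α), l.foldl (fun c _ => g c) x = g^[l.length] x := by
  intro l
  induction l with
  | nil => intro x; simp
  | cons b t ih => intro x; simp [List.foldl_cons, ih, Function.iterate_succ_apply]

theorem tf_lists (w d h m s : Int) :
    PySem.Chars.strip
        ((PySem.List.pyRange 0
              ((PySem.Chars.count ([' '] ++ PySem.Int.toChars w ++ ['w', ' '] ++ PySem.Int.toChars d ++ ['d', ' '] ++ PySem.Int.toChars h ++ ['h', ' '] ++ PySem.Int.toChars m ++ ['m', ' '] ++ PySem.Int.toChars s ++ ['s']) [' ', '0'] : Nat) : Int) 1).foldl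
          (fun c _ => tfStep c) ([' '] ++ PySem.Int.toChars w ++ ['w', ' '] ++ PySem.Int.toChars d ++ ['d', ' '] ++ PySem.Int.toChars h ++ ['h', ' '] ++ PySem.Int.toChars m ++ ['m', ' '] ++ PySem.Int.toChars s ++ ['s'])) =
      PySem.Chars.join [' ']
        ((([(w, 'w'), (d, 'd'), (h, 'h'), (m, 'm'), (s, 's')] : List (Int × Char)).filter
              (fun p => p.1 != 0)).map
          (fun p => PySem.Int.toChars p.1 ++ [p.2])) := by
  have hfs : ([' '] ++ PySem.Int.toChars w ++ ['w', ' '] ++ PySem.Int.toChars d ++ ['d', ' '] ++ PySem.Int.toChars h ++ ['h', ' '] ++ PySem.Int.toChars m ++ ['m', ' '] ++ PySem.Int.toChars s ++ ['s']) =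
      tfSeq (([(w, 'w'), (d, 'd'), (h, 'h'), (m, 'm'), (s, 's')] : List (Int × Char)).map
        (fun p => PySem.Int.toChars p.1 ++ [p.2])) := by
    simp [tfSeq]
  set fs := (([(w, 'w'), (d, 'd'), (h, 'h'), (m, 'm'), (s, 's')] : List (Int × Char)).map
    (fun p => PySem.Int.toChars p.1 ++ [p.2])) with hfsdef
  have hgood : ∀ f ∈ fs, tfGood f := by
    intro f hf
    simp only [hfsdef, List.map_cons, List.map_nil, List.mem_cons, List.not_mem_nil,
      or_false] at hf
    rcases hf with hf | hf | hf | hf | hf <;> subst hf <;>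
      exact field_good _ _ (by decide)
  rw [hfs, count_eq_tfCnt, tfCnt_seq fs hgood, PySem.List.pyRange_zero_natCast,
    foldl_const_iterate, List.length_map, List.length_range,
    tfLoop (fs.countP tfZero) fs hgood rfl,
    strip_seq _ (fun f hf => hgood f (List.mem_of_mem_filter hf)),
    filter_map_field]

-- ===== VERDICT (by name: the statement is the Claim_ definition above) =====
theorem time_format_spec : Claim_equal_time_format := by
  intro time _
  show time_format time = time_format_alt time
  dsimp only [time_format, time_format_alt]
  rw [tf_lists]
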